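-- pv_equiv track=rewrite | github.com/Rene-Michel99/Algoritmo-DPLL-em-python | DPLLh.py | quebraR
-- ===== SOURCE A (Python) =====
-- def quebraR(f,pos,sen,qlist):
--     if pos<len(f):
--         if f[pos]=='(':
--             return quebraR(f,pos+1,sen,qlist)
--         elif f[pos]!=')':
--             sen=sen+f[pos]
--             return quebraR(f,pos+1,sen,qlist)
--         elif f[pos]==')':
--             if len(sen)>0:
--                 if sen[0]=='E':
--                     sen=sen.replace('E','')
--                 qlist.append(sen)
--             sen=''
--             return quebraR(f,pos+1,sen,qlist)
--     else:
--         return qlist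
-- ===== SOURCE B (Python) =====
-- def quebraR(f, pos, sen, qlist):
--     # Strip '(' from the unread suffix, split it on ')', glue the start state
--     # `sen` onto the first segment, and emit every terminated segment.
--     segs = f[pos:].replace('(', '').split(')')
--     segs[0] = sen + segs[0]
--     for seg in segs[:-1]:
--         if seg:
--             qlist.append(seg.replace('E', '') if seg[0] == 'E' else seg)
--     return qlist
-- ===== Notes on version B (the rewrite author's own statement) =====
-- stated objective: idiomatic
-- what changed: Replaces A's character-by-character recursion (one Python frame per character, RecursionError-prone) with a single slice/replace/split pass that strips '(' once, splits the suffix on ')', prepends the start state to the first segment, and emits each terminated non-empty segment.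
-- outside the precondition, e.g. on quebraR('ab)', -1, '', []): A returns ['ab'], B returns []
import Mathlib
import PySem

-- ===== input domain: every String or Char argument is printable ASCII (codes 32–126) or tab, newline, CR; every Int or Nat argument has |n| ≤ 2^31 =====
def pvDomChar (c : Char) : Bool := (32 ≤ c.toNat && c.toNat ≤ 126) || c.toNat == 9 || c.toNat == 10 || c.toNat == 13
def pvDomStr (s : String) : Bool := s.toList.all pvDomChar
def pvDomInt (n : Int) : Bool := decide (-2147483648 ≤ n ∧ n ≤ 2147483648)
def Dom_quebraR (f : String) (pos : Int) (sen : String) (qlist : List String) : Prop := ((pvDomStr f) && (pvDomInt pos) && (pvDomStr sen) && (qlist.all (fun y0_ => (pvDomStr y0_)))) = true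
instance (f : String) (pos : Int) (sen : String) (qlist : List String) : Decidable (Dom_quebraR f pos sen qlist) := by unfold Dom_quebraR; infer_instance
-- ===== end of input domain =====

-- B replaces A's per-character recursion by one slice/strip/split pass (idiomatic);
-- equivalence is about the RETURN value only (Python A and B both append to the passed qlist in place).

-- ===== PORT A =====
-- A's recursion, step for step, on the character list; f[pos] is guarded by pos < len(f),
-- and Pre_ gives 0 ≤ pos, so the pyGetD default is never read inside the claim
-- (for pos < -len(f) Python raises IndexError; excluded by Pre_).
-- sen.replace('E','') removes every 'E' character: ported exactly as a filter.
def quebraRGo (f : List Char) (pos : Int) (sen : List Char) (qlist : List String) : List String :=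
  if _h : pos < (f.length : Int) then
    let c := PySem.List.pyGetD f pos ' '
    if c = '(' then quebraRGo f (pos + 1) sen qlist
    else if c ≠ ')' then quebraRGo f (pos + 1) (sen ++ [c]) qlist
    else
      quebraRGo f (pos + 1) []
        (if 0 < sen.length then
           qlist ++ [String.mk (if PySem.List.pyGet? sen 0 = some 'E' then sen.filter (fun c => c ≠ 'E') else sen)]
         else qlist)
  else qlist
termination_by ((f.length : Int) - pos).toNat
decreasing_by all_goals omega

def quebraR (f : String) (pos : Int) (sen : String) (qlist : List String) : List String :=
  quebraRGo f.toList pos sen.toList qlist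

-- ===== PORT B =====
-- Source B, step for step: f[pos:] is PySem.List.slice; .replace('(','') (one-char pattern,
-- empty replacement) is exactly a filter; .split(')') is List.splitOn; segs[0] = sen + segs[0]
-- is the match; the for-loop over segs[:-1] is a foldl over dropLast.
def quebraR_alt (f : String) (pos : Int) (sen : String) (qlist : List String) : List String :=
  let segs := ((PySem.List.slice f.toList (some pos) none).filter (fun c => c ≠ '(')).splitOn ')'
  let segs2 :=
    match segs with
    | [] => []                                -- unreachable: split never returns []
    | s :: r => (sen.toList ++ s) :: r        -- segs[0] = sen + segs[0]
  segs2.dropLast.foldl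
    (fun q seg =>
      if 0 < seg.length then
        q ++ [String.mk (if PySem.List.pyGet? seg 0 = some 'E' then seg.filter (fun c => c ≠ 'E') else seg)]
      else q) qlist

-- ===== PRECONDITION & SPEC =====
-- Pre_ excludes negative pos: for pos < -len(f) A raises IndexError, and for
-- -len(f) ≤ pos < 0 A's negative-index wraparound re-reads the string tail and then the
-- whole string again — an accident of its recursive indexing on a corner no caller reaches
-- (pos is a scan index, always called with 0); B reads pos as a suffix start there.
def Pre_quebraR (f : String) (pos : Int) (sen : String) (qlist : List String) : Prop := 0 ≤ pos
instance (f : String) (pos : Int) (sen : String) (qlist : List String) : Decidable (Pre_quebraR f pos sen qlist) := by unfold Pre_quebraR; infer_instance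

def pvWitness_quebraR : String × Int × String × List String := ("(A)", 0, "", [])

def Spec_quebraR (f : String) (pos : Int) (sen : String) (qlist : List String) (out : List String) : Prop := out = quebraR_alt f pos sen qlist
instance (f : String) (pos : Int) (sen : String) (qlist : List String) (out : List String) : Decidable (Spec_quebraR f pos sen qlist out) := by unfold Spec_quebraR; infer_instance

-- ===== CLAIM (what is proved, stated in full; the proofs are below) =====
def Claim_equal_quebraR : Prop := ∀ (f : String) (pos : Int) (sen : String) (qlist : List String), Dom_quebraR f pos sen qlist → Pre_quebraR f pos sen qlist → Spec_quebraR f pos sen qlist (quebraR f pos sen qlist)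

-- ===== LEMMAS AND PROOFS =====

-- the token built from an accumulated segment, and the emit step shared by the proofs
def pvTok (sen : List Char) : String :=
  String.mk (if PySem.List.pyGet? sen 0 = some 'E' then sen.filter (fun c => c ≠ 'E') else sen)

def pvEmit (q : List String) (sen : List Char) : List String :=
  if 0 < sen.length then q ++ [pvTok sen] else q

-- A's recursion, restated structurally on the remaining character list
def pvLoopA : List Char → List Char → List String → List String
  | [], _, q => q
  | c :: t, sen, q =>
      if c = '(' then pvLoopA t sen q
      else if c ≠ ')' then pvLoopA t (sen ++ [c]) q
      else pvLoopA t [] (pvEmit q sen)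

-- B's segment list for remaining characters l and start state sen
def pvSegs (sen l : List Char) : List (List Char) :=
  match (l.filter (fun c => c ≠ '(')).splitOn ')' with
  | [] => []
  | s :: r => (sen ++ s) :: r

theorem pvSplitOn_cons (c : Char) (l : List Char) :
    (c :: l).splitOn ')' =
      if c = ')' then [] :: l.splitOn ')' else (l.splitOn ')').modifyHead (List.cons c) := by
  simp [List.splitOn, List.splitOnP_cons]

theorem pvLoopA_eq (l : List Char) :
    ∀ sen q, pvLoopA l sen q = (pvSegs sen l).dropLast.foldl pvEmit q := by
  induction l with
  | nil =>
      intro sen q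
      simp [pvLoopA, pvSegs, List.splitOn_nil]
  | cons c t ih =>
      intro sen q
      obtain ⟨s0, r, hs⟩ : ∃ s0 r, (t.filter (fun c => c ≠ '(')).splitOn ')' = s0 :: r := by
        cases h : (t.filter (fun c => c ≠ '(')).splitOn ')' with
        | nil => exact absurd h (List.splitOnP_ne_nil _ _)
        | cons a b => exact ⟨a, b, rfl⟩
      by_cases hp : c = '('
      · subst hp
        have hsegs : pvSegs sen ('(' :: t) = pvSegs sen t := by
          unfold pvSegs
          rw [show ('(' :: t).filter (fun c => c ≠ '(') = t.filter (fun c => c ≠ '(') by simp]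
        have hA : pvLoopA ('(' :: t) sen q = pvLoopA t sen q := by
          simp [pvLoopA]
        rw [hA, ih sen q, hsegs]
      · by_cases hr : c = ')'
        · subst hr
          have hf : (')' :: t).filter (fun c => c ≠ '(') = ')' :: t.filter (fun c => c ≠ '(') := by
            simp
          have hsegs : pvSegs sen (')' :: t) = sen :: s0 :: r := by
            unfold pvSegs
            rw [hf, pvSplitOn_cons, if_pos rfl, hs]
            simp
          have hsegs0 : pvSegs [] t = s0 :: r := by
            unfold pvSegs
            rw [hs]
            simp
          have hA : pvLoopA (')' :: t) sen q = pvLoopA t [] (pvEmit q sen) := by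
            simp [pvLoopA]
          rw [hA, ih [] (pvEmit q sen), hsegs0, hsegs, List.dropLast_cons₂, List.foldl_cons]
        · have hf : (c :: t).filter (fun c => c ≠ '(') = c :: t.filter (fun c => c ≠ '(') := by
            simp [hp]
          have hsegs : pvSegs sen (c :: t) = pvSegs (sen ++ [c]) t := by
            unfold pvSegs
            rw [hf, pvSplitOn_cons, if_neg hr, hs]
            simp
          have hA : pvLoopA (c :: t) sen q = pvLoopA t (sen ++ [c]) q := by
            simp [pvLoopA, hp, hr]
          rw [hA, ih (sen ++ [c]) q, hsegs]

theorem pvGo_eq (n : Nat) :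
    ∀ (f : List Char) (pos : Int), 0 ≤ pos → f.length - pos.toNat = n →
      ∀ sen q, quebraRGo f pos sen q = pvLoopA (f.drop pos.toNat) sen q := by
  induction n with
  | zero =>
      intro f pos h0 hn sen q
      have hge : ¬ pos < (f.length : Int) := by omega
      rw [quebraRGo, dif_neg hge]
      rw [List.drop_eq_nil_of_le (by omega)]
      rfl
  | succ n ih =>
      intro f pos h0 hn sen q
      have hlt : pos < (f.length : Int) := by omega
      have hlt' : pos.toNat < f.length := by omega
      have hget : PySem.List.pyGetD f pos ' ' = f[pos.toNat] := by
        rw [PySem.List.pyGetD_eq_getElem f ' ' h0 hlt]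
      have hdrop : f.drop pos.toNat = f[pos.toNat] :: f.drop (pos.toNat + 1) :=
        List.drop_eq_getElem_cons hlt'
      have htn : (pos + 1).toNat = pos.toNat + 1 := by omega
      have hlen : f.length - (pos + 1).toNat = n := by omega
      rw [quebraRGo, dif_pos hlt]
      simp only [hget, hdrop, pvLoopA]
      by_cases hp : f[pos.toNat] = '('
      · rw [if_pos hp, if_pos hp, ih f (pos + 1) (by omega) hlen sen q, htn]
      · by_cases hr : f[pos.toNat] = ')'
        · have h2 : ¬ (f[pos.toNat] ≠ ')') := fun hne => hne hr
          rw [if_neg hp, if_neg hp, if_neg h2, if_neg h2]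
          rw [ih f (pos + 1) (by omega) hlen [] _, htn]
          rfl
        · have h2 : f[pos.toNat] ≠ ')' := hr
          rw [if_neg hp, if_neg hp, if_pos h2, if_pos h2]
          rw [ih f (pos + 1) (by omega) hlen (sen ++ [f[pos.toNat]]) q, htn]

theorem pvAlt_eq (f : String) (pos : Int) (sen : String) (qlist : List String) (h : 0 ≤ pos) :
    quebraR_alt f pos sen qlist =
      (pvSegs sen.toList (f.toList.drop pos.toNat)).dropLast.foldl pvEmit qlist := by
  unfold quebraR_alt
  simp only [PySem.List.slice_from f.toList h]
  rfl

-- ===== VERDICT (by name: the statement is the Claim_ definition above) =====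
theorem quebraR_spec : Claim_equal_quebraR := by
  intro f pos sen qlist _dom hpre
  unfold Spec_quebraR quebraR
  rw [pvGo_eq (f.toList.length - pos.toNat) f.toList pos hpre rfl, pvLoopA_eq,
    pvAlt_eq f pos sen qlist hpre]
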